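-- pv_equiv track=rewrite | github.com/VGLALALA/CCCSweatGrind | 2013/S3/S3.py | chancesOfWinning
-- ===== SOURCE A (Python) =====
-- def checkFavIsWinning(score, favorateTeam):
--     isWinning = True
--     for i in range(len(score)):
--         if score[i] >= score[favorateTeam] and i != favorateTeam:
--             isWinning = False
--             break
--     return isWinning
--
-- def chancesOfWinning(favorateTeam, games, score):
--     if not games:
--         if checkFavIsWinning(score, favorateTeam):
--             return 1
--         else:
--             return 0
--     win_possibilities = [(0, 3), (3, 0), (1, 1)]  # possible points gained for a game
--     totalWins = 0
--     a, b = games.pop()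
--     for a_points, b_points in win_possibilities:
--         new_score = score.copy()
--         new_score[a] += a_points
--         new_score[b] += b_points
--         totalWins += chancesOfWinning(favorateTeam, games.copy(), new_score)
--     return totalWins
-- ===== SOURCE B (Python) =====
-- # B: iterative breadth-first enumeration of all outcome combinations instead of A's
-- # pop-the-last-game recursion. NOTE: A pops the last element of `games` (caller-visible
-- # mutation); B leaves `games` untouched -- the equivalence claimed is about the return value.
-- def chancesOfWinning(favorateTeam, games, score):
--     outcomes = [(0, 3), (3, 0), (1, 1)]
--     states = [list(score)]
--     for a, b in games:
--         nxt = []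
--         for s in states:
--             for ap, bp in outcomes:
--                 t = list(s)
--                 t[a] += ap
--                 t[b] += bp
--                 nxt.append(t)
--         states = nxt
--     total = 0
--     for s in states:
--         if all(s[i] < s[favorateTeam] for i in range(len(s)) if i != favorateTeam):
--             total += 1
--     return total
-- ===== Notes on version B (the rewrite author's own statement) =====
-- stated objective: alternative
-- what changed: Replaces A's pop-the-last-game recursion (which also mutates `games`) with an iterative breadth-first expansion: a list of score states is grown game by game over the three outcomes and the winning states are counted at the end; B does not mutate its arguments.
import Mathlib
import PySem

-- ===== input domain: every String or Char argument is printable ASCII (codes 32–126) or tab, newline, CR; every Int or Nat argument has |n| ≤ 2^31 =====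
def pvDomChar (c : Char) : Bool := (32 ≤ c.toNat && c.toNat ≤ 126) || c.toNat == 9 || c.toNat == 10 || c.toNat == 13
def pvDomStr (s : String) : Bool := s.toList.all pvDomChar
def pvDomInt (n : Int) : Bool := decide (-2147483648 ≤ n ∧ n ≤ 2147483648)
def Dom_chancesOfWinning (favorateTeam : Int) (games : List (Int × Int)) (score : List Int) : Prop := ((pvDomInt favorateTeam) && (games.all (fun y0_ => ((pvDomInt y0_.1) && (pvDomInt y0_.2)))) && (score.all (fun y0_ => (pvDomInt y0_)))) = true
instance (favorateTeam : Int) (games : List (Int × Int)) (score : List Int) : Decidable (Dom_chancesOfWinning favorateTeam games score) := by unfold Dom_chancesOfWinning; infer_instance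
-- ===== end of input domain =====

-- B replaces A's pop-the-last-game recursion by an iterative breadth-first expansion of all
-- outcome combinations (objective: alternative decomposition, same asymptotic cost).
-- NOTE: Python A mutates its `games` argument (one pop of the last element); B does not.
-- The equivalence proved here is about the RETURN value only.

-- shared helper of both ports (both Pythons contain literally these two statements):
-- t[a] += a_points; t[b] += b_points
def pvApply (s : List Int) (a b ap bp : Int) : List Int :=
  let t1 := PySem.List.pySetD s a (PySem.List.pyGetD s a 0 + ap)
  PySem.List.pySetD t1 b (PySem.List.pyGetD t1 b 0 + bp)

-- win_possibilities = [(0, 3), (3, 0), (1, 1)]  (outcomes in Source B)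
def pvOutcomes : List (Int × Int) := [(0, 3), (3, 0), (1, 1)]

-- ===== PORT A =====
-- checkFavIsWinning: linear scan with break, i = 0, 1, …
def pvCheckLoop (score : List Int) (favorateTeam : Int) (i : Nat) : Bool :=
  if i < score.length then
    if PySem.List.pyGetD score (i : Int) 0 ≥ PySem.List.pyGetD score favorateTeam 0 ∧ (i : Int) ≠ favorateTeam then
      false
    else
      pvCheckLoop score favorateTeam (i + 1)
  else
    true
termination_by score.length - i

def checkFavIsWinning (score : List Int) (favorateTeam : Int) : Bool :=
  pvCheckLoop score favorateTeam 0

-- a, b = games.pop(); recursion on games.copy() (= the popped list games.dropLast)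
def chancesOfWinning (favorateTeam : Int) (games : List (Int × Int)) (score : List Int) : Int :=
  if hg : games = [] then
    if checkFavIsWinning score favorateTeam then 1 else 0
  else
    let ab := games.getLast hg
    let rest := games.dropLast
    pvOutcomes.foldl
      (fun totalWins pts =>
        totalWins + chancesOfWinning favorateTeam rest (pvApply score ab.1 ab.2 pts.1 pts.2)) 0
termination_by games.length
decreasing_by
  have : games.length ≠ 0 := by simpa [List.length_eq_zero_iff] using hg
  simp only [List.length_dropLast]; omega

-- ===== PORT B =====
-- all(s[i] < s[favorateTeam] for i in range(len(s)) if i != favorateTeam)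
def pvIsWinner (s : List Int) (favorateTeam : Int) : Bool :=
  (PySem.List.pyRange 0 (s.length : Int) 1).all
    (fun i => i == favorateTeam || decide (PySem.List.pyGetD s i 0 < PySem.List.pyGetD s favorateTeam 0))

-- states grown game by game, then the winning states are counted
def chancesOfWinning_alt (favorateTeam : Int) (games : List (Int × Int)) (score : List Int) : Int :=
  let states := games.foldl
    (fun sts ab =>
      sts.flatMap (fun s => pvOutcomes.map (fun p => pvApply s ab.1 ab.2 p.1 p.2)))
    [score]
  states.foldl (fun total s => if pvIsWinner s favorateTeam then total + 1 else total) 0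

-- ===== PRECONDITION & SPEC =====
-- Pre_ excludes exactly the inputs on which Python A raises IndexError: some game names an
-- out-of-range team index, or (when score is nonempty, so the check loop runs) favorateTeam
-- is an invalid index into score.
def Pre_chancesOfWinning (favorateTeam : Int) (games : List (Int × Int)) (score : List Int) : Prop :=
  (∀ g ∈ games, PySem.Raise.InRange score.length g.1 ∧ PySem.Raise.InRange score.length g.2) ∧
  (score ≠ [] → PySem.Raise.InRange score.length favorateTeam)

instance (favorateTeam : Int) (games : List (Int × Int)) (score : List Int) : Decidable (Pre_chancesOfWinning favorateTeam games score) := by unfold Pre_chancesOfWinning; infer_instance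

def pvWitness_chancesOfWinning : Int × (List (Int × Int)) × List Int := (0, [(0, 1), (1, 0)], [3, 1])

def Spec_chancesOfWinning (favorateTeam : Int) (games : List (Int × Int)) (score : List Int) (out : Int) : Prop := out = chancesOfWinning_alt favorateTeam games score
instance (favorateTeam : Int) (games : List (Int × Int)) (score : List Int) (out : Int) : Decidable (Spec_chancesOfWinning favorateTeam games score out) := by unfold Spec_chancesOfWinning; infer_instance

-- ===== CLAIM (what is proved, stated in full; the proofs are below) =====
def Claim_equal_chancesOfWinning : Prop := ∀ (favorateTeam : Int) (games : List (Int × Int)) (score : List Int), Dom_chancesOfWinning favorateTeam games score → Pre_chancesOfWinning favorateTeam games score → Spec_chancesOfWinning favorateTeam games score (chancesOfWinning favorateTeam games score)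

-- ===== LEMMAS AND PROOFS =====

def pvInc (s : List Int) (i v : Int) : List Int :=
  PySem.List.pySetD s i (PySem.List.pyGetD s i 0 + v)

theorem pvIdx_lt {n : Nat} {i : Int} {k : Nat} (h : PySem.List.pyIdx? n i = some k) : k < n := by
  unfold PySem.List.pyIdx? at h
  split_ifs at h <;> simp_all <;> omega

theorem pvInc_eq (s : List Int) (i v : Int) :
    pvInc s i v = match PySem.List.pyIdx? s.length i with
      | none => s
      | some k => s.set k (s.getD k 0 + v) := by
  unfold pvInc PySem.List.pySetD PySem.List.pySet? PySem.List.pyGetD PySem.List.pyGet?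
  cases h : PySem.List.pyIdx? s.length i with
  | none => simp
  | some k =>
    have hk := pvIdx_lt h
    simp [List.getD_eq_getElem?_getD, List.getElem?_eq_getElem hk]

theorem pvInc_none (s : List Int) (i v : Int) (h : PySem.List.pyIdx? s.length i = none) :
    pvInc s i v = s := by rw [pvInc_eq, h]

theorem pvInc_some (s : List Int) (i v : Int) (k : Nat) (h : PySem.List.pyIdx? s.length i = some k) :
    pvInc s i v = s.set k (s.getD k 0 + v) := by rw [pvInc_eq, h]

theorem pvInc_length (s : List Int) (i v : Int) : (pvInc s i v).length = s.length := by
  rw [pvInc_eq]; cases PySem.List.pyIdx? s.length i <;> simp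

theorem pvInc_comm (s : List Int) (i j v w : Int) :
    pvInc (pvInc s i v) j w = pvInc (pvInc s j w) i v := by
  cases hi : PySem.List.pyIdx? s.length i with
  | none =>
    have hi' : PySem.List.pyIdx? (pvInc s j w).length i = none := by rw [pvInc_length, hi]
    rw [pvInc_none s i v hi, pvInc_none _ i v hi']
  | some k =>
    have hk := pvIdx_lt hi
    cases hj : PySem.List.pyIdx? s.length j with
    | none =>
      have hj' : PySem.List.pyIdx? (pvInc s i v).length j = none := by rw [pvInc_length, hj]
      rw [pvInc_none s j w hj, pvInc_none _ j w hj']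
    | some l =>
      have hl := pvIdx_lt hj
      have hi' : PySem.List.pyIdx? (pvInc s j w).length i = some k := by rw [pvInc_length, hi]
      have hj' : PySem.List.pyIdx? (pvInc s i v).length j = some l := by rw [pvInc_length, hj]
      rw [pvInc_some s i v k hi, pvInc_some s j w l hj,
          pvInc_some _ j w l (by rw [List.length_set, hj]),
          pvInc_some _ i v k (by rw [List.length_set, hi])]
      by_cases hkl : k = l
      · subst hkl
        rw [List.set_set, List.set_set]
        have h1 : (s.set k (s.getD k 0 + v)).getD k 0 = s.getD k 0 + v := by
          simp [List.getD_eq_getElem?_getD, hk]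
        have h2 : (s.set k (s.getD k 0 + w)).getD k 0 = s.getD k 0 + w := by
          simp [List.getD_eq_getElem?_getD, hk]
        rw [h1, h2]; ring_nf
      · have h1 : (s.set k (s.getD k 0 + v)).getD l 0 = s.getD l 0 := by
          simp [List.getD_eq_getElem?_getD, List.getElem?_set_ne hkl]
        have h2 : (s.set l (s.getD l 0 + w)).getD k 0 = s.getD k 0 := by
          simp [List.getD_eq_getElem?_getD, List.getElem?_set_ne (Ne.symm hkl)]
        rw [h1, h2, List.set_comm _ _ hkl]

theorem pvCheckLoop_eq (score : List Int) (favorateTeam : Int) (i : Nat) :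
    pvCheckLoop score favorateTeam i
      = decide (∀ k : Nat, i ≤ k → k < score.length →
          ((k : Int) = favorateTeam ∨ PySem.List.pyGetD score (k : Int) 0 < PySem.List.pyGetD score favorateTeam 0)) := by
  induction hn : score.length - i generalizing i with
  | zero =>
    rw [pvCheckLoop]
    have : ¬ i < score.length := by omega
    simp only [this, if_false]
    symm; simp only [decide_eq_true_iff]
    intro k hk1 hk2; omega
  | succ n ih =>
    have hi : i < score.length := by omega
    rw [pvCheckLoop]
    simp only [hi, if_true]
    split_ifs with hc
    · symm; simp only [decide_eq_false_iff_not]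
      intro hall
      rcases hall i Nat.le.refl hi with h | h
      · exact hc.2 h
      · exact absurd hc.1 (by omega)
    · rw [ih (i + 1) (by omega)]
      simp only [decide_eq_decide]
      constructor
      · intro hall k hk1 hk2
        rcases Nat.eq_or_lt_of_le hk1 with heq | hlt
        · subst heq
          by_cases hf : (i : Int) = favorateTeam
          · exact Or.inl hf
          · refine Or.inr ?_
            by_contra hlt2
            exact hc ⟨by omega, hf⟩
        · exact hall k hlt hk2
      · intro hall k hk1 hk2
        exact hall k (by omega) hk2

theorem pvCheck_eq_isWinner (score : List Int) (favorateTeam : Int) :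
    pvCheckLoop score favorateTeam 0 = pvIsWinner score favorateTeam := by
  rw [pvCheckLoop_eq]
  unfold pvIsWinner
  rw [Bool.eq_iff_iff]
  simp only [decide_eq_true_iff, List.all_eq_true, PySem.List.mem_pyRange_one,
    Bool.or_eq_true, beq_iff_eq]
  constructor
  · rintro h x ⟨hx0, hxn⟩
    have hx : ((x.toNat : Int)) = x := Int.toNat_of_nonneg hx0
    rcases h x.toNat (by omega) (by omega) with hcase | hcase
    · rw [hx] at hcase; exact Or.inl hcase
    · rw [hx] at hcase; exact Or.inr (by simpa using hcase)
  · intro h k hk0 hk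
    rcases h (k : Int) ⟨by omega, by omega⟩ with hcase | hcase
    · exact Or.inl hcase
    · exact Or.inr (by simpa using hcase)

theorem pvApply_eq_inc (s : List Int) (a b ap bp : Int) :
    pvApply s a b ap bp = pvInc (pvInc s a ap) b bp := rfl

theorem pvApply_comm (s : List Int) (a1 b1 a2 b2 ap bp aq bq : Int) :
    pvApply (pvApply s a1 b1 ap bp) a2 b2 aq bq
      = pvApply (pvApply s a2 b2 aq bq) a1 b1 ap bp := by
  simp only [pvApply_eq_inc]
  calc pvInc (pvInc (pvInc (pvInc s a1 ap) b1 bp) a2 aq) b2 bq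
      = pvInc (pvInc (pvInc (pvInc s a1 ap) a2 aq) b1 bp) b2 bq := by
        rw [pvInc_comm (pvInc s a1 ap) b1 a2 bp aq]
    _ = pvInc (pvInc (pvInc (pvInc s a2 aq) a1 ap) b1 bp) b2 bq := by
        rw [pvInc_comm s a1 a2 ap aq]
    _ = pvInc (pvInc (pvInc (pvInc s a2 aq) a1 ap) b2 bq) b1 bp := by
        rw [pvInc_comm (pvInc (pvInc s a2 aq) a1 ap) b1 b2 bp bq]
    _ = pvInc (pvInc (pvInc (pvInc s a2 aq) b2 bq) a1 ap) b1 bp := by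
        rw [pvInc_comm (pvInc s a2 aq) a1 b2 ap bq]

def pvCnt (favorateTeam : Int) : List (Int × Int) → List Int → Int
  | [], s => if pvIsWinner s favorateTeam then 1 else 0
  | g :: gs, s => (pvOutcomes.map (fun p => pvCnt favorateTeam gs (pvApply s g.1 g.2 p.1 p.2))).sum

theorem pvCnt_snoc (favorateTeam : Int) (gs : List (Int × Int)) (g : Int × Int) (s : List Int) :
    pvCnt favorateTeam (gs ++ [g]) s
      = (pvOutcomes.map (fun p => pvCnt favorateTeam gs (pvApply s g.1 g.2 p.1 p.2))).sum := by
  induction gs generalizing s with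
  | nil => rfl
  | cons h t ih =>
    show (pvOutcomes.map fun q => pvCnt favorateTeam (t ++ [g]) (pvApply s h.1 h.2 q.1 q.2)).sum = _
    simp only [ih, pvCnt, pvOutcomes, List.map_cons, List.map_nil, List.sum_cons, List.sum_nil]
    simp only [pvApply_comm s h.1 h.2 g.1 g.2]
    ring

theorem pvA_eq_cnt (favorateTeam : Int) (games : List (Int × Int)) (score : List Int) :
    chancesOfWinning favorateTeam games score = pvCnt favorateTeam games score := by
  induction games using List.reverseRecOn generalizing score with
  | nil =>
    rw [chancesOfWinning]
    simp [checkFavIsWinning, pvCheck_eq_isWinner, pvCnt]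
  | append_singleton gs g ih =>
    rw [chancesOfWinning]
    rw [dif_neg (by simp)]
    simp only [List.getLast_concat, List.dropLast_concat]
    rw [PySem.List.foldl_add pvOutcomes (fun pts : Int × Int => chancesOfWinning favorateTeam gs (pvApply score g.1 g.2 pts.1 pts.2)) 0]
    simp only [ih, pvCnt_snoc, zero_add]

theorem pvB_states (favorateTeam : Int) (games : List (Int × Int)) (L : List (List Int)) :
    ((games.foldl
        (fun sts ab =>
          sts.flatMap (fun s => pvOutcomes.map (fun p => pvApply s ab.1 ab.2 p.1 p.2)))
        L).map (fun s => pvCnt favorateTeam [] s)).sum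
      = (L.map (fun s => pvCnt favorateTeam games s)).sum := by
  induction games generalizing L with
  | nil => rfl
  | cons g gs ih =>
    rw [List.foldl_cons, ih]
    rw [List.map_flatMap, List.flatMap_def, List.sum_flatten]
    simp only [List.map_map, Function.comp_def, List.map_map]
    rfl

theorem pvB_eq_cnt (favorateTeam : Int) (games : List (Int × Int)) (score : List Int) :
    chancesOfWinning_alt favorateTeam games score = pvCnt favorateTeam games score := by
  simp only [chancesOfWinning_alt]
  rw [PySem.List.foldl_ite_add_one (fun s => pvIsWinner s favorateTeam = true) _ 0]
  have h := pvB_states favorateTeam games [score]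
  simp only [List.map_cons, List.map_nil, List.sum_cons, List.sum_nil, add_zero] at h
  rw [← h]
  simp only [pvCnt]
  rw [PySem.List.sum_map_ite_one_zero (fun s => pvIsWinner s favorateTeam)]
  simp

-- ===== VERDICT (by name: the statement is the Claim_ definition above) =====
theorem chancesOfWinning_spec : Claim_equal_chancesOfWinning := by
  intro fav games score _ _
  show chancesOfWinning fav games score = chancesOfWinning_alt fav games score
  rw [pvA_eq_cnt, pvB_eq_cnt]
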